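-- pv_equiv track=rewrite | github.com/asimthapa/mini-projects | Rock-Paper-Scissors-on-steriods/game.py | build_game_dict
-- ===== SOURCE A (Python) =====
-- def build_game_dict(chars: list):
--     """
--     Builds the game dictionary. Contains list of characters that can win the value character
--     Args:
--         chars (list): list of characters in the game
--
--     Returns:
--         dict: Game winning dictionary.
--     """
--     # half of the characters can win the value character
--     value_len = int(len(chars) / 2)
--     game_win_dict = {}
--     for char_index, char in enumerate(chars):
--         game_win_dict[char] = []
--
--         start_index = char_index + 1
--         if start_index >= len(chars):
--             start_index = 0
--         end_index = char_index + value_len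
--         if end_index >= len(chars):
--             end_index = end_index - len(chars)
--
--         for i in range(start_index, start_index + value_len):
--             curr_i = i
--             if i >= len(chars):
--                 curr_i = i - len(chars)
--             game_win_dict[char].append(chars[curr_i])
--     return game_win_dict
-- ===== SOURCE B (Python) =====
-- def build_game_dict(chars: list):
--     n = len(chars)
--     value_len = n // 2
--     extended = chars + chars
--     game_win_dict = {}
--     for char_index, char in enumerate(chars):
--         start = (char_index + 1) % n
--         game_win_dict[char] = extended[start:start + value_len]
--     return game_win_dict
-- ===== Notes on version B (the rewrite author's own statement) =====
-- stated objective: simpler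
-- what changed: Replaces A's inner element-by-element loop with modulo-style index wraparound (and its dead end_index bookkeeping) by building a doubled list chars+chars once and assigning each key one contiguous slice of it.
import Mathlib
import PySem

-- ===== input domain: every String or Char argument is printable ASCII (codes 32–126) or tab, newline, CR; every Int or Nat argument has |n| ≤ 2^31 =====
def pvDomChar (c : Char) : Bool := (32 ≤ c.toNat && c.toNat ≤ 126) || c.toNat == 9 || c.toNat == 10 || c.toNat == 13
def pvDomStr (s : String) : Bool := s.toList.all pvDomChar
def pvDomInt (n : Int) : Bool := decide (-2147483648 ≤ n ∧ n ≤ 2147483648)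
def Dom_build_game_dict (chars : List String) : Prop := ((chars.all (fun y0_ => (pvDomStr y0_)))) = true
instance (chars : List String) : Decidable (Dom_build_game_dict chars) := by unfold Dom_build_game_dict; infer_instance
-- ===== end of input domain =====

-- B replaces A's per-element modulo-wraparound inner loop by one contiguous slice of a doubled list (simpler; same asymptotic cost).

-- ===== PORT A =====
-- literal port of A: per char, insert [] then append chars[curr_i] for each i in
-- range(start_index, start_index + value_len), wrapping curr_i by subtracting len(chars).
-- (A also computes an `end_index` that it never reads; that dead statement is omitted.)
def build_game_dict (chars : List String) : List (String × List String) :=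
  let n : Int := (chars.length : Int)
  let value_len : Int := PySem.Int.truncdiv n 2     -- int(len(chars) / 2)
  ((PySem.List.enumerate chars).foldl
    (fun (d : PySem.Dict String (List String)) p =>
      let char_index := p.1
      let char := p.2
      let d := d.insert char []
      let start_index : Int := if char_index + 1 ≥ n then 0 else char_index + 1
      (PySem.List.pyRange start_index (start_index + value_len)).foldl
        (fun d i =>
          let curr_i : Int := if i ≥ n then i - n else i
          -- chars[curr_i]: curr_i is always in range here, so the default is never read
          d.modify char [] (fun v => v ++ [PySem.List.pyGetD chars curr_i ""]))
        d)
    ⟨[]⟩).items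

-- ===== PORT B =====
-- port of Source B: doubled list + one slice per char
def build_game_dict_alt (chars : List String) : List (String × List String) :=
  let n : Int := (chars.length : Int)
  let value_len : Int := PySem.Int.floordiv n 2     -- n // 2
  let extended := chars ++ chars
  ((PySem.List.enumerate chars).foldl
    (fun (d : PySem.Dict String (List String)) p =>
      let start : Int := PySem.Int.mod (p.1 + 1) n
      d.insert p.2 (PySem.List.slice extended (some start) (some (start + value_len))))
    ⟨[]⟩).items

-- ===== PRECONDITION & SPEC =====
def Spec_build_game_dict (chars : List String) (out : List (String × List String)) : Prop := out = build_game_dict_alt chars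
instance (chars : List String) (out : List (String × List String)) : Decidable (Spec_build_game_dict chars out) := by unfold Spec_build_game_dict; infer_instance

-- ===== CLAIM (what is proved, stated in full; the proofs are below) =====
def Claim_equal_build_game_dict : Prop := ∀ (chars : List String), Dom_build_game_dict chars → Spec_build_game_dict chars (build_game_dict chars)

-- ===== LEMMAS AND PROOFS =====

-- A's inner append loop over a freshly-inserted key collapses to a single insert of the mapped list.
theorem fold_modify_append {g : Int → String} (l : List Int)
    (d : PySem.Dict String (List String)) (k : String) (a : List String) :
    l.foldl (fun d i => d.modify k [] (fun v => v ++ [g i])) (d.insert k a)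
      = d.insert k (a ++ l.map g) := by
  induction l generalizing a with
  | nil => simp
  | cons i t ih =>
    have hstep : (d.insert k a).modify k [] (fun v => v ++ [g i]) = d.insert k (a ++ [g i]) := by
      rw [PySem.Dict.modify, PySem.Dict.getD_insert_self, PySem.Dict.insert_insert_self]
    rw [List.foldl_cons, hstep, ih]
    simp

-- pyRange over a window of Nat length v starting at Nat s
theorem pyRange_window (s v : Nat) :
    PySem.List.pyRange (s : Int) ((s : Int) + (v : Int))
      = (List.range v).map (fun k : Nat => (s : Int) + (k : Int)) := by
  induction v generalizing s with
  | zero =>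
    rw [PySem.List.pyRange_of_pos _ _ (s := 1) (by norm_num)]
    simp
  | succ v ih =>
    rw [PySem.List.pyRange_one_cons (by omega)]
    have h1 : (s : Int) + 1 = ((s + 1 : Nat) : Int) := by push_cast; ring
    have h2 : (s : Int) + ((v + 1 : Nat) : Int) = ((s + 1 : Nat) : Int) + (v : Int) := by
      push_cast; ring
    rw [h2, h1, ih (s + 1), List.range_succ_eq_map]
    simp [List.map_map, Function.comp_def]
    intro a _; ring

-- the core window equality: A's modulo-indexed window = B's slice of the doubled list
theorem window_eq (chars : List String) (s : Nat) (hs : s < chars.length) :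
    ((List.range (chars.length / 2)).map
      (fun k : Nat => PySem.List.pyGetD chars
        (if ((s : Int) + (k : Int)) ≥ (chars.length : Int)
          then (s : Int) + (k : Int) - (chars.length : Int)
          else (s : Int) + (k : Int)) ""))
      = PySem.List.slice (chars ++ chars) (some (s : Int))
          (some ((s : Int) + ((chars.length / 2 : Nat) : Int))) := by
  have hcast : (s : Int) + ((chars.length / 2 : Nat) : Int) = ((s + chars.length / 2 : Nat) : Int) := by
    push_cast; ring
  rw [hcast, PySem.List.slice_natCast]
  set m := chars.length with hm
  have hlen : (List.take (s + m / 2 - s) (List.drop s (chars ++ chars))).length = m / 2 := by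
    simp [List.length_take, List.length_drop]
    omega
  apply List.ext_getElem
  · rw [hlen]; simp
  · intro j hj₁ hj₂
    simp only [List.getElem_map, List.getElem_range]
    have hjv : j < m / 2 := by simpa using hj₁
    have hidx : s + j < (chars ++ chars).length := by simp; omega
    rw [List.getElem_take, List.getElem_drop]
    by_cases hw : s + j < m
    · rw [if_neg (by omega)]
      have : (s : Int) + (j : Int) = ((s + j : Nat) : Int) := by push_cast; ring
      rw [this, PySem.List.pyGetD_natCast]
      rw [List.getElem_append_left (by omega)]
      exact (List.getD_eq_getElem _ _ hw).symm ▸ rfl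
    · rw [if_pos (by omega)]
      have : (s : Int) + (j : Int) - (m : Int) = ((s + j - m : Nat) : Int) := by omega
      rw [this, PySem.List.pyGetD_natCast]
      have hlt : s + j - m < m := by omega
      rw [List.getElem_append_right (by omega)]
      have : (chars.getD (s + j - m) "") = chars[s + j - m] := List.getD_eq_getElem _ _ hlt
      rw [this]

-- ===== VERDICT (by name: the statement is the Claim_ definition above) =====
theorem build_game_dict_spec : Claim_equal_build_game_dict := by
  intro chars _
  unfold Spec_build_game_dict build_game_dict build_game_dict_alt
  dsimp only
  congr 1
  apply PySem.List.foldl_congr_mem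
  intro d p hp
  obtain ⟨ci, x⟩ := p
  have hb : 0 ≤ ci ∧ ci < (chars.length : Int) := by
    obtain ⟨k, hk, hpe⟩ := (PySem.List.mem_enumerate_iff _ _ _).mp hp
    have hci : ci = (k : Int) := by simpa using congrArg Prod.fst hpe
    constructor <;> omega
  obtain ⟨hb0, hb1⟩ := hb
  set n : Int := (chars.length : Int) with hn
  have hm0 : 0 < chars.length := by omega
  -- the two start indices agree
  have hstart : (if ci + 1 ≥ n then (0 : Int) else ci + 1) = PySem.Int.mod (ci + 1) n := by
    rw [PySem.Int.mod_eq_emod_of_pos (by omega)]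
    by_cases h : ci + 1 ≥ n
    · have : ci + 1 = n := by omega
      rw [if_pos h, this]
      simp
    · rw [if_neg h, Int.emod_eq_of_lt (by omega) (by omega)]
  -- the two half-lengths agree, as a Nat
  have hv : PySem.Int.truncdiv n 2 = ((chars.length / 2 : Nat) : Int) := by
    show PySem.Int.truncdiv ((chars.length : Int)) 2 = _
    simp [PySem.Int.truncdiv]
  have hvf : PySem.Int.floordiv n 2 = ((chars.length / 2 : Nat) : Int) := by
    rw [PySem.Int.floordiv_eq_ediv_of_pos (by omega)]
    omega
  simp only [hv, hvf, ← hstart]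
  -- name the common start index as a Nat
  set sI : Int := (if ci + 1 ≥ n then (0 : Int) else ci + 1) with hsI
  have hsnat : ∃ s : Nat, sI = (s : Int) ∧ s < chars.length := by
    by_cases h : ci + 1 ≥ n
    · exact ⟨0, by rw [hsI, if_pos h]; rfl, hm0⟩
    · exact ⟨(ci + 1).toNat, by rw [hsI, if_neg h]; omega, by omega⟩
  obtain ⟨s, hseq, hslt⟩ := hsnat
  rw [hseq, pyRange_window, fold_modify_append, List.map_map, List.nil_append]
  have := window_eq chars s hslt
  rw [Function.comp_def] at *
  rw [this]
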